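-- pv_equiv track=rewrite | github.com/Jiu-xiao/XRDAP-SWD-Probe | src/vcd_to_png.py | derive_host_drive_on_wire_tv
-- ===== SOURCE A (Python) =====
-- def normalize_1bit_val(v):
--     if v is None:
--         return 'x'
--     s = str(v)
--     if s in ('0', '1'):
--         return s
--     if s in ('x', 'X'):
--         return 'x'
--     if s in ('z', 'Z'):
--         return 'z'
--     if s.startswith('b') and len(s) >= 2:
--         bits = s[1:]
--         if len(bits) == 1 and bits in ('0', '1', 'x', 'z', 'X', 'Z'):
--             return normalize_1bit_val(bits)
--         return 'x'
--     return 'x'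
--
-- def value_at(tv, ts):
--     last = '0'
--     for t, v in sorted(tv, key=lambda x: x[0]):
--         if t > ts:
--             break
--         last = normalize_1bit_val(v)
--     return last
--
-- def merge_change_times(*tvs):
--     ts = set()
--     for tv in tvs:
--         if not tv:
--             continue
--         for t, _ in tv:
--             ts.add(int(t))
--     return sorted(ts)
--
-- def derive_host_drive_on_wire_tv(tv_mosi, tv_swdio, tv_tb_en=None):
--     """
--     host_drive = (target not driving) AND (bus not Z) ? MOSI : Z
--     - If TB drives (tb_en=1): host_drive=Z
--     - Else if bus is Z: host_drive=Z (turnaround / released)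
--     - Else host_drive = MOSI (what host is putting onto the line through DUT)
--     """
--     if not tv_mosi or not tv_swdio:
--         return []
--     pts = merge_change_times(tv_mosi, tv_swdio, tv_tb_en if tv_tb_en else [])
--     out = []
--     last = None
--     for t in pts:
--         if tv_tb_en and value_at(tv_tb_en, t) == '1':
--             v = 'z'
--         else:
--             bus = value_at(tv_swdio, t)
--             if bus == 'z':
--                 v = 'z'
--             else:
--                 mv = value_at(tv_mosi, t)
--                 v = mv if mv in ('0','1') else 'x'
--         if v != last:
--             out.append((t, v))
--             last = v
--     return out
-- ===== SOURCE B (Python) =====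
-- def normalize_1bit_val(v):
--     if v is None:
--         return 'x'
--     s = str(v)
--     if s in ('0', '1'):
--         return s
--     if s in ('x', 'X'):
--         return 'x'
--     if s in ('z', 'Z'):
--         return 'z'
--     if s.startswith('b') and len(s) >= 2:
--         bits = s[1:]
--         if len(bits) == 1 and bits in ('0', '1', 'x', 'z', 'X', 'Z'):
--             return normalize_1bit_val(bits)
--         return 'x'
--     return 'x'
--
--
-- def derive_host_drive_on_wire_tv(tv_mosi, tv_swdio, tv_tb_en=None):
--     """Single-pass sweep: each stream is sorted once and consumed by a moving
--     pointer over the merged, increasing change times (instead of re-sorting and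
--     re-scanning every stream at every time point)."""
--     if not tv_mosi or not tv_swdio:
--         return []
--     en = tv_tb_en if tv_tb_en else []
--     # sort each stream once, normalizing values up front
--     ms = [(t, normalize_1bit_val(v)) for t, v in sorted(tv_mosi, key=lambda x: x[0])]
--     sw = [(t, normalize_1bit_val(v)) for t, v in sorted(tv_swdio, key=lambda x: x[0])]
--     ev = [(t, normalize_1bit_val(v)) for t, v in sorted(en, key=lambda x: x[0])]
--     times = sorted({int(t) for tv in (tv_mosi, tv_swdio, en) for t, _ in tv})
--     im = isw = ie = 0
--     mcur = scur = ecur = '0'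
--     out = []
--     last = None
--     for t in times:
--         while im < len(ms) and ms[im][0] <= t:
--             mcur = ms[im][1]; im += 1
--         while isw < len(sw) and sw[isw][0] <= t:
--             scur = sw[isw][1]; isw += 1
--         while ie < len(ev) and ev[ie][0] <= t:
--             ecur = ev[ie][1]; ie += 1
--         if en and ecur == '1':
--             v = 'z'
--         elif scur == 'z':
--             v = 'z'
--         else:
--             v = mcur if mcur in ('0', '1') else 'x'
--         if v != last:
--             out.append((t, v))
--             last = v
--     return out
-- ===== Notes on version B (the rewrite author's own statement) =====
-- stated objective: faster
-- what changed: B sorts each stream once and sweeps all three with moving pointers over the merged increasing change times, instead of A's value_at which re-sorts and rescans every stream at every time point.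
import Mathlib
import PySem

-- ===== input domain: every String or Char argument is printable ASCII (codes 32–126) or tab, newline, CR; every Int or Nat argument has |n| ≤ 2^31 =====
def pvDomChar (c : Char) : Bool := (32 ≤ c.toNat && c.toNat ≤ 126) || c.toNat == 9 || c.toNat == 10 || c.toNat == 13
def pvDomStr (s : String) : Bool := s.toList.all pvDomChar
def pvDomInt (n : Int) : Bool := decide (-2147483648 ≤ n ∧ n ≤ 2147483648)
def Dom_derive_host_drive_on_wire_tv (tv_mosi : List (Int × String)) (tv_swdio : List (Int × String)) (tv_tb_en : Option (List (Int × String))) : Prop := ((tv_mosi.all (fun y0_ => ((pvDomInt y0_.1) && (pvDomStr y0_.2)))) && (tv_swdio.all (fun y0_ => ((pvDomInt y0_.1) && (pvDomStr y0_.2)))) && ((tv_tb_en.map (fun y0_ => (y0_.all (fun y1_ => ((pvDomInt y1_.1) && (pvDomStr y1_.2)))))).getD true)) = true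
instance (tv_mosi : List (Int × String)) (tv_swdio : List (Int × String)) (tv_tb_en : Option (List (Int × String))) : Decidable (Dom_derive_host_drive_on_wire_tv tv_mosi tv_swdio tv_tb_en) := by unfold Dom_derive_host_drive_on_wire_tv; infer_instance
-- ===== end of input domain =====

-- B re-implements A with one sort per stream and a single pointer sweep over the merged
-- change times, instead of A's re-sort-and-rescan (value_at) at every time point.

-- ===== PORT A =====
-- normalize_1bit_val, on the character list of the string (v is a String here: the
-- Python 'v is None' branch is unreachable under the typed signature, str(v) = v)
def normA (s : List Char) : String :=
  if s = ['0'] ∨ s = ['1'] then String.ofList s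
  else if s = ['x'] ∨ s = ['X'] then "x"
  else if s = ['z'] ∨ s = ['Z'] then "z"
  else if h : s.head? = some 'b' ∧ 2 ≤ s.length then
    -- bits = s[1:]
    let bits := s.drop 1
    if bits.length = 1 ∧ (bits = ['0'] ∨ bits = ['1'] ∨ bits = ['x'] ∨ bits = ['z'] ∨ bits = ['X'] ∨ bits = ['Z'])
    then normA bits else "x"
  else "x"
termination_by s.length
decreasing_by simp; omega

def normalize_1bit_val (v : String) : String := normA v.toList

-- the for-loop of value_at with its break (t > ts)
def valueAtGo (ts : Int) : List (Int × String) → String → String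
  | [], last => last
  | (t, v) :: rest, last => if t > ts then last else valueAtGo ts rest (normalize_1bit_val v)

def value_at (tv : List (Int × String)) (ts : Int) : String :=
  valueAtGo ts (PySem.List.sorted tv (fun x => x.1) false) "0"

-- merge_change_times(tv_mosi, tv_swdio, tb) — the three-argument call the function makes
def merge_change_times (a b c : List (Int × String)) : List Int :=
  let ts := [a, b, c].foldl
    (fun ts tv => if tv = [] then ts else tv.foldl (fun ts p => PySem.Set.add ts p.1) ts)
    PySem.Set.empty
  PySem.List.sorted ts (fun x => x) false

-- the decision chain shared by both Pythons' loop bodies: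
-- tb drives -> 'z'; bus 'z' -> 'z'; else mosi if 0/1 else 'x'
def vOf (tb : Bool) (mval sval eval_ : String) : String :=
  if tb = true ∧ eval_ = "1" then "z"
  else if sval = "z" then "z"
  else if mval = "0" ∨ mval = "1" then mval else "x"

-- the body of A's main loop; st = (last, out)
def stepA (tbB : Bool) (en tv_swdio tv_mosi : List (Int × String))
    (st : Option String × List (Int × String)) (t : Int) : Option String × List (Int × String) :=
  let v := vOf tbB (value_at tv_mosi t) (value_at tv_swdio t) (value_at en t)
  if st.1 ≠ some v then (some v, st.2 ++ [(t, v)]) else st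

def derive_host_drive_on_wire_tv (tv_mosi : List (Int × String)) (tv_swdio : List (Int × String)) (tv_tb_en : Option (List (Int × String))) : List (Int × String) :=
  if tv_mosi = [] ∨ tv_swdio = [] then []
  else
    -- `tv_tb_en if tv_tb_en else []` (None and [] both become []); tbB = truthiness of tv_tb_en
    let en : List (Int × String) := tv_tb_en.getD []
    let tbB : Bool := match tv_tb_en with | none => false | some l => !l.isEmpty
    let pts := merge_change_times tv_mosi tv_swdio en
    (pts.foldl (stepA tbB en tv_swdio tv_mosi) (none, [])).2

-- ===== PORT B =====
-- [(t, normalize_1bit_val(v)) for t, v in sorted(tv, key=lambda x: x[0])]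
def sortNorm (tv : List (Int × String)) : List (Int × String) :=
  (PySem.List.sorted tv (fun x => x.1) false).map (fun p => (p.1, normalize_1bit_val p.2))

-- the inner `while i < len(l) and l[i][0] <= t: cur = l[i][1]; i += 1`,
-- with the pointer represented by the remaining suffix of the list
def advance (r : List (Int × String)) (cur : String) (t : Int) : List (Int × String) × String :=
  match r with
  | [] => ([], cur)
  | (t0, v) :: rest => if t0 ≤ t then advance rest v t else ((t0, v) :: rest, cur)

-- the main `for t in times` sweep of B
def sweep (enB : Bool) : List Int → List (Int × String) → String → List (Int × String) → String →
    List (Int × String) → String → Option String → List (Int × String) → List (Int × String)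
  | [], _, _, _, _, _, _, _, out => out
  | t :: ts, rm, mc, rs, sc, re, ec, last, out =>
    let am := advance rm mc t
    let as_ := advance rs sc t
    let ae := advance re ec t
    let v := vOf enB am.2 as_.2 ae.2
    if last ≠ some v then sweep enB ts am.1 am.2 as_.1 as_.2 ae.1 ae.2 (some v) (out ++ [(t, v)])
    else sweep enB ts am.1 am.2 as_.1 as_.2 ae.1 ae.2 last out

def derive_host_drive_on_wire_tv_alt (tv_mosi : List (Int × String)) (tv_swdio : List (Int × String)) (tv_tb_en : Option (List (Int × String))) : List (Int × String) :=
  if tv_mosi = [] ∨ tv_swdio = [] then []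
  else
    let en : List (Int × String) := tv_tb_en.getD []
    let ms := sortNorm tv_mosi
    let sw := sortNorm tv_swdio
    let ev := sortNorm en
    -- times = sorted({t for tv in (tv_mosi, tv_swdio, en) for t, _ in tv})
    let times := PySem.List.sorted
      (PySem.Set.ofList (([tv_mosi, tv_swdio, en]).flatMap (fun tv => tv.map (fun p => p.1))))
      (fun x => x) false
    sweep (!en.isEmpty) times ms "0" sw "0" ev "0" none []

-- ===== PRECONDITION & SPEC =====
def Spec_derive_host_drive_on_wire_tv (tv_mosi : List (Int × String)) (tv_swdio : List (Int × String)) (tv_tb_en : Option (List (Int × String))) (out : List (Int × String)) : Prop := out = derive_host_drive_on_wire_tv_alt tv_mosi tv_swdio tv_tb_en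
instance (tv_mosi : List (Int × String)) (tv_swdio : List (Int × String)) (tv_tb_en : Option (List (Int × String))) (out : List (Int × String)) : Decidable (Spec_derive_host_drive_on_wire_tv tv_mosi tv_swdio tv_tb_en out) := by unfold Spec_derive_host_drive_on_wire_tv; infer_instance

-- ===== CLAIM (what is proved, stated in full; the proofs are below) =====
def Claim_equal_derive_host_drive_on_wire_tv : Prop := ∀ (tv_mosi : List (Int × String)) (tv_swdio : List (Int × String)) (tv_tb_en : Option (List (Int × String))), Dom_derive_host_drive_on_wire_tv tv_mosi tv_swdio tv_tb_en → Spec_derive_host_drive_on_wire_tv tv_mosi tv_swdio tv_tb_en (derive_host_drive_on_wire_tv tv_mosi tv_swdio tv_tb_en)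

-- ===== LEMMAS AND PROOFS =====

-- the predicate "change time ≤ t" and the "last value wins" fold
def sp (t : Int) : Int × String → Bool := fun p => decide (p.1 ≤ t)

def f2 : String → Int × String → String := fun _ p => p.2

-- the value a sorted+normalized stream holds at time t
def W (tv : List (Int × String)) (t : Int) : String :=
  ((sortNorm tv).takeWhile (sp t)).foldl f2 "0"

lemma takeWhile_app {q : Int × String → Bool} {xs ys : List (Int × String)}
    (h : ∀ p ∈ xs, q p = true) : (xs ++ ys).takeWhile q = xs ++ ys.takeWhile q := by
  induction xs with
  | nil => simp
  | cons p rest ih =>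
    simp [h p (List.mem_cons_self ..),
      ih fun q hq => h q (List.mem_cons_of_mem _ hq)]

lemma advance_spec (r : List (Int × String)) (cur : String) (t : Int) :
    advance r cur t = (r.dropWhile (sp t), (r.takeWhile (sp t)).foldl f2 cur) := by
  induction r generalizing cur with
  | nil => simp [advance]
  | cons p rest ih =>
    obtain ⟨t0, v⟩ := p
    by_cases h : t0 ≤ t
    · simp [advance, h, sp, ih, f2]
    · simp [advance, h, sp]

lemma valueAtGo_eq (ts : Int) (l : List (Int × String)) (last : String) :
    valueAtGo ts l last = (l.takeWhile (sp ts)).foldl (fun _ p => normalize_1bit_val p.2) last := by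
  induction l generalizing last with
  | nil => simp [valueAtGo]
  | cons p rest ih =>
    obtain ⟨t, v⟩ := p
    by_cases h : t > ts
    · simp [valueAtGo, h, sp, not_le.mpr h]
    · simp [valueAtGo, h, sp, not_lt.mp h, ih]

lemma value_at_eq_W (tv : List (Int × String)) (t : Int) : value_at tv t = W tv t := by
  unfold value_at W sortNorm
  rw [valueAtGo_eq, List.takeWhile_map, List.foldl_map]
  rfl

-- the sweep invariant for one stream: r is the unconsumed suffix of the sorted stream,
-- cur the last consumed value, and everything consumed lies at or before all pending times
def InvS (tv r : List (Int × String)) (cur : String) (times : List Int) : Prop :=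
  ∃ done, sortNorm tv = done ++ r ∧ cur = done.foldl f2 "0" ∧ ∀ p ∈ done, ∀ u ∈ times, p.1 ≤ u

lemma inv_step {tv r : List (Int × String)} {cur : String} {t : Int} {ts : List Int}
    (h : InvS tv r cur (t :: ts)) (hts : ∀ u ∈ ts, t ≤ u) :
    (advance r cur t).2 = W tv t ∧ InvS tv (advance r cur t).1 (advance r cur t).2 ts := by
  obtain ⟨done, hfull, hcur, hle⟩ := h
  rw [advance_spec]
  have hdone_t : ∀ p ∈ done, sp t p = true := fun p hp => by
    simpa [sp] using hle p hp t (List.mem_cons_self ..)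
  have htake : (sortNorm tv).takeWhile (sp t) = done ++ r.takeWhile (sp t) := by
    rw [hfull]; exact takeWhile_app hdone_t
  constructor
  · show (r.takeWhile (sp t)).foldl f2 cur = W tv t
    rw [W, htake, List.foldl_append, ← hcur]
  · refine ⟨done ++ r.takeWhile (sp t), ?_, ?_, ?_⟩
    · rw [hfull, List.append_assoc, List.takeWhile_append_dropWhile]
    · rw [List.foldl_append, ← hcur]
    · intro p hp u hu
      rcases List.mem_append.mp hp with h1 | h2
      · exact hle p h1 u (List.mem_cons_of_mem _ hu)
      · have hpt := List.mem_takeWhile_imp h2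
        simp only [sp, decide_eq_true_eq] at hpt
        exact hpt.trans (hts u hu)

lemma sweep_eq (tbB : Bool) (en s m : List (Int × String)) :
    ∀ (times : List Int), times.Pairwise (· ≤ ·) →
    ∀ rm mc rs sc re ec, InvS m rm mc times → InvS s rs sc times → InvS en re ec times →
    ∀ last out, sweep tbB times rm mc rs sc re ec last out =
      (times.foldl (stepA tbB en s m) (last, out)).2 := by
  intro times
  induction times with
  | nil => intros; rfl
  | cons t ts ih =>
    intro hpw rm mc rs sc re ec hm hs he last out
    obtain ⟨hts, hpw'⟩ := List.pairwise_cons.mp hpw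
    obtain ⟨hmv, hm'⟩ := inv_step hm hts
    obtain ⟨hsv, hs'⟩ := inv_step hs hts
    obtain ⟨hev, he'⟩ := inv_step he hts
    simp only [sweep, List.foldl_cons, stepA]
    rw [hmv, hsv, hev, ← value_at_eq_W, ← value_at_eq_W, ← value_at_eq_W]
    rw [hmv, ← value_at_eq_W] at hm'
    rw [hsv, ← value_at_eq_W] at hs'
    rw [hev, ← value_at_eq_W] at he'
    by_cases hl : last = some (vOf tbB (value_at m t) (value_at s t) (value_at en t))
    · simp only [hl, ne_eq, not_true_eq_false, ite_false]
      exact ih hpw' _ _ _ _ _ _ hm' hs' he' _ _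
    · simp only [ne_eq, hl, not_false_eq_true, ite_true]
      exact ih hpw' _ _ _ _ _ _ hm' hs' he' _ _

lemma merge_eq (a b c : List (Int × String)) :
    merge_change_times a b c = PySem.List.sorted
      (PySem.Set.ofList (([a, b, c]).flatMap (fun tv => tv.map (fun p => p.1))))
      (fun x => x) false := by
  unfold merge_change_times
  have h : ∀ (ts : PySem.Set Int) (tv : List (Int × String)),
      (if tv = [] then ts else tv.foldl (fun ts p => PySem.Set.add ts p.1) ts)
        = PySem.Set.update ts (tv.map (fun p => p.1)) := by
    intro ts tv
    split
    · next hnil => subst hnil; rw [List.map_nil, PySem.Set.update_nil]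
    · rw [PySem.Set.update_map_eq_foldl_add]
  simp only [List.foldl_cons, List.foldl_nil, h]
  congr 1
  simp [PySem.Set.update_nil_left, ← PySem.Set.ofList_append, List.append_assoc]

lemma invS_init (tv : List (Int × String)) (times : List Int) :
    InvS tv (sortNorm tv) "0" times := ⟨[], rfl, rfl, by simp⟩

-- ===== VERDICT (by name: the statement is the Claim_ definition above) =====
theorem derive_host_drive_on_wire_tv_spec : Claim_equal_derive_host_drive_on_wire_tv := by
  intro tv_mosi tv_swdio tv_tb_en _
  unfold Spec_derive_host_drive_on_wire_tv
  unfold derive_host_drive_on_wire_tv derive_host_drive_on_wire_tv_alt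
  by_cases h : tv_mosi = [] ∨ tv_swdio = []
  · simp [h]
  · simp only [if_neg h]
    have key : ∀ (en : List (Int × String)) (tbB : Bool),
        ((merge_change_times tv_mosi tv_swdio en).foldl (stepA tbB en tv_swdio tv_mosi) (none, [])).2
          = sweep tbB
              (PySem.List.sorted
                (PySem.Set.ofList (([tv_mosi, tv_swdio, en]).flatMap (fun tv => tv.map (fun p => p.1))))
                (fun x => x) false)
              (sortNorm tv_mosi) "0" (sortNorm tv_swdio) "0" (sortNorm en) "0" none [] := by
      intro en tbB
      rw [merge_eq]
      have hpw := (PySem.List.sorted_ofList_pairwise_lt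
        (xs := ([tv_mosi, tv_swdio, en]).flatMap (fun tv => tv.map (fun p => p.1)))).imp
        (fun h => le_of_lt h)
      exact (sweep_eq tbB en tv_swdio tv_mosi _ hpw _ _ _ _ _ _
        (invS_init _ _) (invS_init _ _) (invS_init _ _) none []).symm
    cases tv_tb_en with
    | none => exact key [] false
    | some l => exact key l (!l.isEmpty)
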